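-- pv_equiv track=rewrite | github.com/shanry/RNA-Undesign | scripts/parser.py | shrink
-- ===== SOURCE A (Python) =====
-- def shrink(i, j, bpairs, SIZE = 2):
--     inew, jnew = i, j
--     for pair in bpairs:
--         delta = pair[1] - pair[0] - 1 - SIZE
--         if pair[1] < i:
--             inew -= delta
--             jnew -= delta
--         elif pair[0] > i and pair[1] < j:
--             jnew -= delta
--         elif pair[0] == i or pair[1] == j:
--             jnew -= delta
--     return inew, jnew
-- ===== SOURCE B (Python) =====
-- def shrink(i, j, bpairs, SIZE=2):
--     # Recursive back-to-front pass: compute the total (di, dj) shift vector for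
--     # the tail, then add this pair's contribution vector; subtract once at the end.
--     def go(pairs):
--         if not pairs:
--             return (0, 0)
--         si, sj = go(pairs[1:])
--         p, q = pairs[0]
--         d = q - p - 1 - SIZE
--         d_i = d if q < i else 0
--         d_j = d if (q < i or p == i or q == j or (p > i and q < j)) else 0
--         return (si + d_i, sj + d_j)
--     si, sj = go(bpairs)
--     return (i - si, j - sj)
-- ===== Notes on version B (the rewrite author's own statement) =====
-- stated objective: alternative
-- what changed: Instead of A's single forward loop that mutates (inew, jnew) through a three-way elif chain, B recurses over the list back-to-front building a per-pair contribution vector (d_i, d_j) -- the j-condition collapsed to one union predicate -- sums the vectors, and subtracts the total shift from (i, j) once at the end.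
import Mathlib
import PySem

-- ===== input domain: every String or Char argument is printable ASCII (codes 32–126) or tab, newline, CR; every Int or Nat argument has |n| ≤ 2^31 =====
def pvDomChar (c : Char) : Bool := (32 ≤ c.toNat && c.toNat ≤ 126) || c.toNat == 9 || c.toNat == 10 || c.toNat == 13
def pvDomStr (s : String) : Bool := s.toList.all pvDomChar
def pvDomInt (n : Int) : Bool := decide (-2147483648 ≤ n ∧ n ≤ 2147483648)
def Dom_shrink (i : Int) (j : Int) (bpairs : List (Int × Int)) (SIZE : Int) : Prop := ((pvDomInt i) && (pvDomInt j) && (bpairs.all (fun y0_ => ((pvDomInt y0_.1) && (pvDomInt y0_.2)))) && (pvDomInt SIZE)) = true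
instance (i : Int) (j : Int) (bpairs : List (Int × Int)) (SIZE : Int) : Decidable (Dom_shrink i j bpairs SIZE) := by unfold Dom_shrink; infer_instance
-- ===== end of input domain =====

-- B replaces A's forward accumulator loop (three-way elif) by a back-to-front recursion
-- summing per-pair contribution vectors, subtracted from (i, j) once (objective: alternative).


-- ===== PORT A =====
-- Literal port: one forward pass, state (inew, jnew), the three-way elif chain.
def shrink (i : Int) (j : Int) (bpairs : List (Int × Int)) (SIZE : Int) : Int × Int :=
  bpairs.foldl
    (fun st pair =>
      let delta := pair.2 - pair.1 - 1 - SIZE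
      if pair.2 < i then (st.1 - delta, st.2 - delta)
      else if pair.1 > i ∧ pair.2 < j then (st.1, st.2 - delta)
      else if pair.1 = i ∨ pair.2 = j then (st.1, st.2 - delta)
      else st)
    (i, j)

-- ===== PORT B =====
-- Port of Source B's helper go: recursion on the list, returning the total shift vector.
def shrinkGo (i : Int) (j : Int) (SIZE : Int) : List (Int × Int) → Int × Int
  | [] => (0, 0)
  | pair :: rest =>
    let s := shrinkGo i j SIZE rest
    let p := pair.1
    let q := pair.2
    let d := q - p - 1 - SIZE
    let di := if q < i then d else 0
    let dj := if q < i ∨ p = i ∨ q = j ∨ (p > i ∧ q < j) then d else 0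
    (s.1 + di, s.2 + dj)

def shrink_alt (i : Int) (j : Int) (bpairs : List (Int × Int)) (SIZE : Int) : Int × Int :=
  let s := shrinkGo i j SIZE bpairs
  (i - s.1, j - s.2)

-- ===== PRECONDITION & SPEC =====
def Spec_shrink (i : Int) (j : Int) (bpairs : List (Int × Int)) (SIZE : Int) (out : Int × Int) : Prop := out = shrink_alt i j bpairs SIZE
instance (i : Int) (j : Int) (bpairs : List (Int × Int)) (SIZE : Int) (out : Int × Int) : Decidable (Spec_shrink i j bpairs SIZE out) := by unfold Spec_shrink; infer_instance

-- ===== CLAIM (what is proved, stated in full; the proofs are below) =====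
def Claim_equal_shrink : Prop := ∀ (i : Int) (j : Int) (bpairs : List (Int × Int)) (SIZE : Int), Dom_shrink i j bpairs SIZE → Spec_shrink i j bpairs SIZE (shrink i j bpairs SIZE)

-- ===== LEMMAS AND PROOFS =====

-- Loop invariant: A's fold from any start (a, b) subtracts exactly B's shift vector.
theorem shrink_fold_eq (i j SIZE : Int) (l : List (Int × Int)) (a b : Int) :
    l.foldl
      (fun st pair =>
        let delta := pair.2 - pair.1 - 1 - SIZE
        if pair.2 < i then (st.1 - delta, st.2 - delta)
        else if pair.1 > i ∧ pair.2 < j then (st.1, st.2 - delta)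
        else if pair.1 = i ∨ pair.2 = j then (st.1, st.2 - delta)
        else st)
      (a, b)
    = (a - (shrinkGo i j SIZE l).1, b - (shrinkGo i j SIZE l).2) := by
  induction l generalizing a b with
  | nil => simp [shrinkGo]
  | cons pr t ih =>
    simp only [List.foldl_cons, shrinkGo]
    by_cases h1 : pr.2 < i
    · have hu : pr.2 < i ∨ pr.1 = i ∨ pr.2 = j ∨ (pr.1 > i ∧ pr.2 < j) := Or.inl h1
      simp only [if_pos h1, if_pos hu, ih, Prod.mk.injEq]
      constructor <;> ring
    · by_cases h2 : pr.1 > i ∧ pr.2 < j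
      · have hu : pr.2 < i ∨ pr.1 = i ∨ pr.2 = j ∨ (pr.1 > i ∧ pr.2 < j) := Or.inr (Or.inr (Or.inr h2))
        simp only [if_neg h1, if_pos h2, if_pos hu, ih, Prod.mk.injEq]
        constructor <;> ring
      · by_cases h3 : pr.1 = i ∨ pr.2 = j
        · have hu : pr.2 < i ∨ pr.1 = i ∨ pr.2 = j ∨ (pr.1 > i ∧ pr.2 < j) := by tauto
          simp only [if_neg h1, if_neg h2, if_pos h3, if_pos hu, ih, Prod.mk.injEq]
          constructor <;> ring
        · have hu : ¬ (pr.2 < i ∨ pr.1 = i ∨ pr.2 = j ∨ (pr.1 > i ∧ pr.2 < j)) := by tauto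
          simp only [if_neg h1, if_neg h2, if_neg h3, if_neg hu, ih, Prod.mk.injEq]
          constructor <;> ring

-- ===== VERDICT (by name: the statement is the Claim_ definition above) =====
theorem shrink_spec : Claim_equal_shrink := by
  intro i j bpairs SIZE _
  unfold Spec_shrink shrink shrink_alt
  exact shrink_fold_eq i j SIZE bpairs i j
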